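-- pv_equiv track=rewrite | github.com/hah-ak/algorithm-study | programmers/best_set.py | solution
-- ===== SOURCE A (Python) =====
-- def solution(n,s):
--     q, r = divmod(s, n)
--
--     if q == 0:
--         return [-1]
--
--     result = [q] * n
--     for i in range(len(result)-1,-1,-1):
--         if r == 0:
--             break
--         else:
--             r -= 1
--             result[i] += 1
--
--     return result
-- ===== SOURCE B (Python) =====
-- def solution(n, s):
--     q, r = divmod(s, n)
--     if q == 0:
--         return [-1]
--     # peel parts off the top: the current last part is ceil(s/n)
--     out = []
--     while n > 0:
--         take = -((-s) // n)
--         out.append(take)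
--         s -= take
--         n -= 1
--     out.reverse()
--     return out
-- ===== Notes on version B (the rewrite author's own statement) =====
-- stated objective: alternative
-- what changed: Instead of filling [q]*n and distributing the remainder over the last r slots, B repeatedly peels the current last part off as ceil(s/n) into an accumulator and reverses it; only the q==0 guard's divmod remains.
import Mathlib
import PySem

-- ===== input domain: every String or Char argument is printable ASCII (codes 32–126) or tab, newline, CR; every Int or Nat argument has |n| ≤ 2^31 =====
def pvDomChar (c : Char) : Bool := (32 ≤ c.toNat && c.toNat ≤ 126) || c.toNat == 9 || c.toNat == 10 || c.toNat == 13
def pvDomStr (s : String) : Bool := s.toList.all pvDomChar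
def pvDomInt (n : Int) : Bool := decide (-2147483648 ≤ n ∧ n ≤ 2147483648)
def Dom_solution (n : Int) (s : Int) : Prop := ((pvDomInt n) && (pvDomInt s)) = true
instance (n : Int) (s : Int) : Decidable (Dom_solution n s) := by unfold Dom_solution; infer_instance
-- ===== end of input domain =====

-- B replaces A's fill-then-distribute-remainder loop by a loop that peels the
-- last part off as ceil(s/n) and splits the rest among n-1 parts (objective: alternative).

-- ===== PORT A =====
-- the for-loop over range(len(result)-1,-1,-1) with its early break;
-- indices i are always in range (0 ≤ i < len), so set/getD at i.toNat is exact
def solutionLoop (r : Int) (result : List Int) (idxs : List Int) : List Int :=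
  match idxs with
  | [] => result
  | i :: rest =>
      if r == 0 then result
      else solutionLoop (r - 1) (result.set i.toNat ((result.getD i.toNat 0) + 1)) rest

def solution (n : Int) (s : Int) : List Int :=
  let q := PySem.Int.floordiv s n
  let r := PySem.Int.mod s n
  if q == 0 then [-1]
  else
    let result := List.replicate n.toNat q
    solutionLoop r result (PySem.List.pyRange ((result.length : Int) - 1) (-1) (-1))

-- ===== PORT B =====
-- the while-loop: peel the current last part off as ceil(s/n) = -((-s) // n), append, shrink
def splitLoop (n : Int) (s : Int) (out : List Int) : List Int :=
  if _h : n ≤ 0 then out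
  else
    let take := -(PySem.Int.floordiv (-s) n)
    splitLoop (n - 1) (s - take) (out ++ [take])
termination_by n.toNat
decreasing_by omega

def solution_alt (n : Int) (s : Int) : List Int :=
  let q := PySem.Int.floordiv s n
  if q == 0 then [-1]
  else (splitLoop n s []).reverse

-- ===== PRECONDITION & SPEC =====
-- n = 0 makes A's divmod raise ZeroDivisionError, so it is excluded
def Pre_solution (n : Int) (_s : Int) : Prop := n ≠ 0
instance (n : Int) (s : Int) : Decidable (Pre_solution n s) := by unfold Pre_solution; infer_instance
def pvWitness_solution : Int × Int := (3, 14)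

def Spec_solution (n : Int) (s : Int) (out : List Int) : Prop := out = solution_alt n s
instance (n : Int) (s : Int) (out : List Int) : Decidable (Spec_solution n s out) := by unfold Spec_solution; infer_instance

-- ===== CLAIM (what is proved, stated in full; the proofs are below) =====
def Claim_equal_solution : Prop := ∀ (n : Int) (s : Int), Dom_solution n s → Pre_solution n s → Spec_solution n s (solution n s)

-- ===== LEMMAS AND PROOFS =====

-- A's loop adds 1 to the last r elements of a block of q's, back to front
theorem solutionLoop_replicate (q : Int) :
    ∀ (k : Nat) (tail : List Int) (r : Int), 0 ≤ r → r ≤ k →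
      solutionLoop r (List.replicate k q ++ tail) (PySem.List.pyRange ((k : Int) - 1) (-1) (-1)) =
        List.replicate (k - r.toNat) q ++ List.replicate r.toNat (q + 1) ++ tail := by
  intro k
  induction k with
  | zero =>
      intro tail r h0 hk
      have hr : r = 0 := le_antisymm (by exact_mod_cast hk) h0
      subst hr
      simp [solutionLoop]
  | succ k ih =>
      intro tail r h0 hk
      rw [PySem.List.pyRange_neg_one_cons (by omega : (-1:Int) < (k+1 : Nat) - 1)]
      by_cases hr0 : r = 0
      · subst hr0; simp [solutionLoop]
      · have hrpos : 0 < r := lt_of_le_of_ne h0 (Ne.symm hr0)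
        rw [solutionLoop, if_neg (by simpa using hr0)]
        have hcast : (((k+1 : Nat) : Int) - 1).toNat = k := by omega
        have hrepl : List.replicate (k+1) q ++ tail = List.replicate k q ++ (q :: tail) := by
          rw [List.replicate_succ']; simp
        have hget : (List.replicate (k+1) q ++ tail).getD k 0 = q := by
          rw [hrepl]
          have : (List.replicate k q ++ (q :: tail)).getD k 0
              = (q :: tail).getD (k - (List.replicate k q).length) 0 := by
            apply List.getD_append_right; simp
          simp
        have hset : (List.replicate (k+1) q ++ tail).set k (q + 1)
            = List.replicate k q ++ ((q+1) :: tail) := by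
          rw [hrepl, List.set_append_right _ _ (by simp)]
          simp
        rw [hcast, hget, hset]
        have hk' : ((k+1 : Nat) : Int) - 1 - 1 = (k : Int) - 1 := by push_cast; ring
        rw [hk', ih ((q+1) :: tail) (r - 1) (by omega) (by push_cast at hk ⊢; omega)]
        have h1 : k - (r-1).toNat = k + 1 - r.toNat := by omega
        have h2 : List.replicate r.toNat (q+1) ++ tail
            = List.replicate (r-1).toNat (q+1) ++ ((q+1) :: tail) := by
          have : r.toNat = (r-1).toNat + 1 := by omega
          rw [this, List.replicate_succ']
          simp
        rw [h1, List.append_assoc, List.append_assoc, h2]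

-- B's loop appends parts top-down: r copies of q+1, then n-r copies of q, after out
theorem splitLoop_closed :
    ∀ (k : Nat) (n s : Int) (out : List Int), n = (k : Int) → 0 < n →
      splitLoop n s out =
        out ++ List.replicate (PySem.Int.mod s n).toNat (PySem.Int.floordiv s n + 1) ++
        List.replicate (n - PySem.Int.mod s n).toNat (PySem.Int.floordiv s n) := by
  intro k
  induction k with
  | zero => intro n s out hn h; omega
  | succ k ih =>
      intro n s out hn hpos
      set q := PySem.Int.floordiv s n with hq
      set r := PySem.Int.mod s n with hr
      have hdiv : q * n + r = s := PySem.Int.floordiv_mul_add_mod s n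
      have hr0 : 0 ≤ r := PySem.Int.mod_nonneg s hpos
      have hrn : r < n := PySem.Int.mod_lt s hpos
      rw [splitLoop, dif_neg (by omega)]
      -- the peeled part: ceil(s/n) = q if r = 0 else q + 1
      have hceil : -(PySem.Int.floordiv (-s) n) = if r = 0 then q else q + 1 := by
        rw [PySem.Int.neg_floordiv_neg_eq_iff_of_pos hpos]
        split_ifs with h0
        · constructor <;> nlinarith
        · have hrpos : 0 < r := by omega
          constructor <;> nlinarith
      by_cases hn1 : n = 1
      · subst hn1
        have h0 : r = 0 := by omega
        simp [splitLoop, hceil, h0, ← hdiv]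
      · have hpos' : 0 < n - 1 := by omega
        by_cases h0 : r = 0
        · -- remaining s' = s - q = q*(n-1), so q' = q, r' = 0
          rw [hceil, if_pos h0]
          show splitLoop (n - 1) (s - q) (out ++ [q]) =
            out ++ List.replicate r.toNat (q + 1) ++ List.replicate (n - r).toNat q
          have hfd : PySem.Int.floordiv (s - q) (n - 1) = q := by
            rw [PySem.Int.floordiv_eq_iff_of_pos hpos']; constructor <;> nlinarith
          have hmd : PySem.Int.mod (s - q) (n - 1) = 0 := by
            have := PySem.Int.floordiv_mul_add_mod (s - q) (n - 1)
            rw [hfd] at this; nlinarith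
          rw [ih (n - 1) (s - q) (out ++ [q]) (by omega) hpos', hfd, hmd]
          have e1 : (n - 0).toNat = (n - 1 - 0).toNat + 1 := by omega
          simp only [h0, e1, List.replicate_succ]
          simp
        · -- remaining s' = s - (q+1) = q*(n-1) + (r-1)
          rw [hceil, if_neg h0]
          show splitLoop (n - 1) (s - (q + 1)) (out ++ [q + 1]) =
            out ++ List.replicate r.toNat (q + 1) ++ List.replicate (n - r).toNat q
          have hrpos : 0 < r := by omega
          have hfd : PySem.Int.floordiv (s - (q + 1)) (n - 1) = q := by
            rw [PySem.Int.floordiv_eq_iff_of_pos hpos']; constructor <;> nlinarith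
          have hmd : PySem.Int.mod (s - (q + 1)) (n - 1) = r - 1 := by
            have := PySem.Int.floordiv_mul_add_mod (s - (q + 1)) (n - 1)
            rw [hfd] at this; nlinarith
          rw [ih (n - 1) (s - (q + 1)) (out ++ [q + 1]) (by omega) hpos', hfd, hmd]
          have e1 : (n - 1 - (r - 1)).toNat = (n - r).toNat := by omega
          have e2 : r.toNat = (r - 1).toNat + 1 := by omega
          rw [e1, e2, List.replicate_succ]
          simp

-- ===== VERDICT (by name: the statement is the Claim_ definition above) =====
theorem solution_spec : Claim_equal_solution := by
  intro n s _ hn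
  unfold Spec_solution solution solution_alt
  simp only []
  by_cases hq : PySem.Int.floordiv s n == 0
  · simp [hq]
  · simp only [hq, if_false, Bool.false_eq_true]
    set r := PySem.Int.mod s n with hrdef
    rcases lt_or_gt_of_ne hn with hneg | hpos
    · -- n < 0 : A's result is [], and splitParts returns [] at once
      have hb := PySem.Int.mod_neg_bounds s hneg
      have hnt : n.toNat = 0 := by omega
      simp [hnt, solutionLoop, splitLoop, (by omega : n ≤ 0)]
    · -- n > 0 : both sides equal the closed-form blocks
      have hr0 : 0 ≤ r := PySem.Int.mod_nonneg s hpos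
      have hrn : r < n := PySem.Int.mod_lt s hpos
      have hlen : ((List.replicate n.toNat (PySem.Int.floordiv s n)).length : Int) = (n.toNat : Int) := by
        simp
      rw [hlen, ← List.append_nil (List.replicate n.toNat (PySem.Int.floordiv s n))]
      rw [solutionLoop_replicate (PySem.Int.floordiv s n) n.toNat [] r hr0 (by omega)]
      rw [splitLoop_closed n.toNat n s [] (by omega) hpos, ← hrdef]
      have h1 : n.toNat - r.toNat = (n - r).toNat := by omega
      simp [h1]
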